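/- GENERATED by farm/mkstatement.py from design/units.tsv (unit `decode_residue.COMPOSITION`) and the Specs of Vorbis/Spec/*.lean — do not edit.
   THE STATEMENT of the proof unit `decode_residue.COMPOSITION`: the function `decode_residue` (813 instructions) satisfies its contract,
   GIVEN THE STATEMENTS OF ITS 11 SEGMENTS (`Vorbis.Spec.DecodeResidue.Seg<k> Lay μ u₀`: what the unit `decode_residue.<k>` proves).
   No machine code is walked: `ReachVia.trans` along the segments (the exit assertion of a segment is the entry assertion of
   its successor), an induction on the loop measures. What the names mean: Vorbis/Spec/Basic.lean. The theorem to prove: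
   `theorem decode_residue_COMPOSITION_ok : Vorbis.Spec.decode_residue_COMPOSITION.Statement`. -/
import Vorbis.Spec.DecodeResidue
namespace Vorbis.Spec.decode_residue_COMPOSITION
open X86 X86.User Asan

/-- The statement of unit `decode_residue.COMPOSITION`. -/
def Statement : Prop :=
  ∀ (Lay : Layout) (_hLay : Lay.hi = 0x1000000) (μ : Microarch) (_hμ : UserX.MicroOK μ) (u₀ : State)
    (_h_decode_residue_1 : Vorbis.Spec.DecodeResidue.Seg1 Lay μ u₀)
    (_h_decode_residue_2 : Vorbis.Spec.DecodeResidue.Seg2 Lay μ u₀)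
    (_h_decode_residue_3 : Vorbis.Spec.DecodeResidue.Seg3 Lay μ u₀)
    (_h_decode_residue_4 : Vorbis.Spec.DecodeResidue.Seg4 Lay μ u₀)
    (_h_decode_residue_5 : Vorbis.Spec.DecodeResidue.Seg5 Lay μ u₀)
    (_h_decode_residue_6 : Vorbis.Spec.DecodeResidue.Seg6 Lay μ u₀)
    (_h_decode_residue_7 : Vorbis.Spec.DecodeResidue.Seg7 Lay μ u₀)
    (_h_decode_residue_8 : Vorbis.Spec.DecodeResidue.Seg8 Lay μ u₀)
    (_h_decode_residue_9 : Vorbis.Spec.DecodeResidue.Seg9 Lay μ u₀)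
    (_h_decode_residue_10 : Vorbis.Spec.DecodeResidue.Seg10 Lay μ u₀)
    (_h_decode_residue_11 : Vorbis.Spec.DecodeResidue.Seg11 Lay μ u₀),
    ∀ (len : Nat) (A : Arena) (others : List Obj) (frames : List (Nat × FrameLayout)) (stored room : Int) (ysz : Nat → Nat), Calls Lay μ Vorbis.WayInv (Vorbis.conv u₀) Vorbis.L.decode_residue.entry (Vorbis.Spec.decode_residue.spec len A others frames stored room ysz)

end Vorbis.Spec.decode_residue_COMPOSITION
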